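-- pv_equiv track=rewrite | github.com/pathi108/DataSense | anerlyisis_type_identification/anerlysis_type_checkers/catergorical_checker.py | is_catergorical
-- ===== SOURCE A (Python) =====
-- def is_catergorical(unique_types,data_type):
--     if data_type!="integer":
--         return False
--     if len(unique_types)==2:
--         return False
--     unique_types = [int(i) for i in unique_types]
--     min_item=min(unique_types)
--     max_item=max(unique_types)
--     item_range=range(min_item,max_item+1)
--     if set(item_range)==set(unique_types):
--         return True
-- ===== SOURCE B (Python) =====
-- def is_catergorical(unique_types, data_type):
--     if data_type != "integer":
--         return False
--     if len(unique_types) == 2: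
--         return False
--     values = sorted(set(int(i) for i in unique_types))
--     expected = min(values)  # raises ValueError on empty input, like A's min()
--     for v in values:
--         if v != expected:
--             break
--         expected += 1
--     else:
--         return True
-- ===== Notes on version B (the rewrite author's own statement) =====
-- stated objective: alternative
-- what changed: Replaces building set(range(min,max+1)) and comparing it for set equality by a sort-then-adjacency scan over the deduplicated values, breaking at the first gap.
import Mathlib
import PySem

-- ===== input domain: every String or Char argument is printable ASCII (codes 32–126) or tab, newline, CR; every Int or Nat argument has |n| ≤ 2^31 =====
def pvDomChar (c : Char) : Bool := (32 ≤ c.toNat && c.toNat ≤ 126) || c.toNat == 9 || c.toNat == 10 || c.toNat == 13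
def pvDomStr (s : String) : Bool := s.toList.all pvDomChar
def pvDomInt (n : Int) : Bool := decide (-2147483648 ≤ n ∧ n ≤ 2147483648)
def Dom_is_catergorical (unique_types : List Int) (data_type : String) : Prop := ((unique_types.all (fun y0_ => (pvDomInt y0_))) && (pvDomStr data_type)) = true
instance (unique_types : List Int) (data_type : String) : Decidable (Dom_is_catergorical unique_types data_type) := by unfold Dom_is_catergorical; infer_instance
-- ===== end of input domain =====

-- B replaces A's set(range(min,max+1)) == set(values) test by a sort-then-adjacency scan over the deduplicated values (alternative decomposition, same behaviour).


-- ===== PORT A =====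
def is_catergorical (unique_types : List Int) (data_type : String) : Option Bool :=
  if data_type ≠ "integer" then some false
  else if unique_types.length = 2 then some false
  else
    match PySem.List.min? unique_types (fun x => x), PySem.List.max? unique_types (fun x => x) with
    | some min_item, some max_item =>
        if PySem.Set.equal (PySem.Set.ofList (PySem.List.pyRange min_item (max_item + 1) 1))
            (PySem.Set.ofList unique_types) then some true
        else none
    | _, _ => none  -- min()/max() of an empty list: ValueError, excluded by Pre_

-- ===== PORT B =====
-- the for/else adjacency scan: `break` → none (implicit None), loop exhausted → some true
def bScan : List Int → Int → Option Bool
  | [], _ => some true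
  | v :: rest, expected => if v ≠ expected then none else bScan rest (expected + 1)

def is_catergorical_alt (unique_types : List Int) (data_type : String) : Option Bool :=
  if data_type ≠ "integer" then some false
  else if unique_types.length = 2 then some false
  else
    let values := PySem.List.sorted (PySem.Set.ofList unique_types) (fun x => x) false
    match PySem.List.min? values (fun x => x) with
    | some expected => bScan values expected
    | none => none  -- min([]) raises ValueError, excluded by Pre_

-- ===== PRECONDITION & SPEC =====
-- Pre_ excludes only the inputs on which A raises: data_type == "integer" with an empty list (min([]) -> ValueError).
def Pre_is_catergorical (unique_types : List Int) (data_type : String) : Prop :=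
  data_type = "integer" → unique_types ≠ []
instance (unique_types : List Int) (data_type : String) : Decidable (Pre_is_catergorical unique_types data_type) := by unfold Pre_is_catergorical; infer_instance
def pvWitness_is_catergorical : List Int × String := ([3, 5, 4], "integer")

def Spec_is_catergorical (unique_types : List Int) (data_type : String) (out : Option Bool) : Prop := out = is_catergorical_alt unique_types data_type
instance (unique_types : List Int) (data_type : String) (out : Option Bool) : Decidable (Spec_is_catergorical unique_types data_type out) := by unfold Spec_is_catergorical; infer_instance

-- ===== CLAIM (what is proved, stated in full; the proofs are below) =====
def Claim_equal_is_catergorical : Prop := ∀ (unique_types : List Int) (data_type : String), Dom_is_catergorical unique_types data_type → Pre_is_catergorical unique_types data_type → Spec_is_catergorical unique_types data_type (is_catergorical unique_types data_type)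

-- ===== LEMMAS AND PROOFS =====

-- bScan succeeds on a contiguous run starting at its expected value
theorem bScan_range (n : Nat) : ∀ e : Int, bScan (PySem.List.pyRange e (e + n) 1) e = some true := by
  induction n with
  | zero => intro e; rw [PySem.List.pyRange_one_eq_nil (by omega)]; rfl
  | succ k ih =>
      intro e
      have harg : e + ((k + 1 : Nat) : Int) = (e + 1) + k := by push_cast; ring
      rw [PySem.List.pyRange_one_cons (by omega), harg]
      simpa [bScan] using ih (e + 1)

-- if bScan returns some true, the list is exactly the contiguous run
theorem bScan_eq_true (l : List Int) : ∀ e : Int, bScan l e = some true →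
    l = PySem.List.pyRange e (e + l.length) 1 := by
  induction l with
  | nil => intro e _; simp [PySem.List.pyRange_one_eq_nil]
  | cons v rest ih =>
      intro e h
      by_cases hv : v = e
      · subst hv
        simp only [bScan, ne_eq, not_true_eq_false, if_false] at h
        have hr := ih (v + 1) (by simpa using h)
        rw [PySem.List.pyRange_one_cons
          (by simp only [List.length_cons]; push_cast; omega : v < v + ((v :: rest).length : Int))]
        have harg : v + ((v :: rest).length : Int) = (v + 1) + rest.length := by
          simp only [List.length_cons]; push_cast; ring
        rw [harg]
        exact congrArg (v :: ·) hr
      · simp [bScan, hv] at h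

-- bScan never returns some false
theorem bScan_true_or_none (l : List Int) : ∀ e : Int, bScan l e = some true ∨ bScan l e = none := by
  induction l with
  | nil => intro e; left; rfl
  | cons v rest ih =>
      intro e
      by_cases hv : v = e
      · subst hv; simpa [bScan] using ih (v + 1)
      · right; simp [bScan, hv]

theorem is_catergorical_spec : Claim_equal_is_catergorical := by
  intro u d _ hpre
  unfold Spec_is_catergorical is_catergorical is_catergorical_alt
  by_cases hd : d ≠ "integer"
  · simp [hd]
  · simp only [if_neg hd]
    rw [not_not] at hd
    have hne : u ≠ [] := hpre hd
    by_cases hlen : u.length = 2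
    · simp [hlen]
    · simp only [if_neg hlen]
      -- A side: min/max exist
      obtain ⟨mn, hmn⟩ : ∃ mn, PySem.List.min? u (fun x => x) = some mn := by
        cases h : PySem.List.min? u (fun x => x) with
        | none => exact absurd ((PySem.List.min?_eq_none_iff _ _).mp h) hne
        | some m => exact ⟨m, rfl⟩
      obtain ⟨mx, hmx⟩ : ∃ mx, PySem.List.max? u (fun x => x) = some mx := by
        cases h : PySem.List.max? u (fun x => x) with
        | none => exact absurd ((PySem.List.max?_eq_none_iff _ _).mp h) hne
        | some m => exact ⟨m, rfl⟩
      have hmn_mem : mn ∈ u := PySem.List.min?_mem hmn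
      have hmn_min : ∀ y ∈ u, mn ≤ y := by
        intro y hy; exact PySem.List.min?_isMin hmn y hy
      have hmx_mem : mx ∈ u := PySem.List.max?_mem hmx
      have hmx_max : ∀ y ∈ u, y ≤ mx := by
        intro y hy; exact PySem.List.max?_isMax hmx y hy
      -- B side: values
      set values := PySem.List.sorted (PySem.Set.ofList u) (fun x => x) false with hvals
      have hmem_vals : ∀ x, x ∈ values ↔ x ∈ u := by
        intro x; rw [hvals, PySem.List.mem_sorted, PySem.Set.mem_ofList]
      have hvne : values ≠ [] := by
        intro h
        have := (hmem_vals mn).mpr hmn_mem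
        simp [h] at this
      obtain ⟨e, he⟩ : ∃ e, PySem.List.min? values (fun x => x) = some e := by
        cases h : PySem.List.min? values (fun x => x) with
        | none => exact absurd ((PySem.List.min?_eq_none_iff _ _).mp h) hvne
        | some m => exact ⟨m, rfl⟩
      have he_eq : e = mn := by
        have h1 : e ∈ u := (hmem_vals e).mp (PySem.List.min?_mem he)
        have h2 : mn ∈ values := (hmem_vals mn).mpr hmn_mem
        have h3 : e ≤ mn := PySem.List.min?_isMin he mn h2
        have h4 : mn ≤ e := hmn_min e h1
        omega
      rw [hmn, hmx, he, he_eq]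
      dsimp only
      have hvnodup : values.Nodup := by
        rw [hvals]
        exact (PySem.List.sorted_perm _ _ _).nodup_iff.mpr (PySem.Set.nodup_ofList u)
      have hvinc : values.Pairwise (· < ·) := by
        rw [hvals]; exact PySem.List.sorted_ofList_pairwise_lt u
      have hmnmx : mn ≤ mx := hmn_min mx hmx_mem
      -- set-equality condition on A's side
      by_cases hC : ∀ x, mn ≤ x ∧ x < mx + 1 ↔ x ∈ u
      · -- A returns some true; show bScan succeeds
        have hAeq : PySem.Set.equal (PySem.Set.ofList (PySem.List.pyRange mn (mx + 1) 1))
            (PySem.Set.ofList u) = true := by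
          rw [PySem.Set.equal_iff]
          intro x
          rw [PySem.Set.mem_ofList, PySem.Set.mem_ofList, PySem.List.mem_pyRange_one]
          exact hC x
        rw [if_pos hAeq]
        -- values = pyRange mn (mx+1) 1
        have hperm : (PySem.List.pyRange mn (mx + 1) 1).Perm (PySem.Set.ofList u) := by
          rw [List.perm_ext_iff_of_nodup (PySem.List.nodup_pyRange_one _ _) (PySem.Set.nodup_ofList u)]
          intro x
          rw [PySem.Set.mem_ofList, PySem.List.mem_pyRange_one]
          exact hC x
        have hveq : values = PySem.List.pyRange mn (mx + 1) 1 := by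
          rw [hvals]
          exact PySem.List.sorted_eq_of_perm_of_pairwise_lt _ _ _ hperm
            (PySem.List.pairwise_lt_pyRange_one _ _)
        rw [hveq]
        have hn : mx + 1 = mn + ((mx + 1 - mn).toNat : Int) := by omega
        rw [hn]
        exact (bScan_range (mx + 1 - mn).toNat mn).symm
      · -- A returns none; show bScan fails
        have hAeq : PySem.Set.equal (PySem.Set.ofList (PySem.List.pyRange mn (mx + 1) 1))
            (PySem.Set.ofList u) ≠ true := by
          intro h
          apply hC
          intro x
          have := (PySem.Set.equal_iff _ _).mp h x
          rw [PySem.Set.mem_ofList, PySem.Set.mem_ofList, PySem.List.mem_pyRange_one] at this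
          exact this
        rw [if_neg hAeq]
        rcases bScan_true_or_none values mn with hb | hb
        · exfalso
          have hveq := bScan_eq_true values mn hb
          apply hC
          intro x
          constructor
          · intro ⟨h1, h2⟩
            -- show x ∈ u: x ∈ pyRange mn (mn + values.length) 1
            -- first: mn + values.length = mx + 1
            have hmem' : ∀ y, y ∈ u ↔ mn ≤ y ∧ y < mn + (values.length : Int) := by
              intro y
              rw [← hmem_vals y]
              conv_lhs => rw [hveq]
              rw [PySem.List.mem_pyRange_one]
            have hmxlt : mx < mn + (values.length : Int) := ((hmem' mx).mp hmx_mem).2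
            -- mn + values.length - 1 ∈ u, hence ≤ mx
            have hLpos : values.length ≠ 0 := by
              intro h; exact hvne (List.eq_nil_of_length_eq_zero h)
            have htop : mn + (values.length : Int) - 1 ∈ u := by
              rw [hmem' _]
              constructor <;> omega
            have := hmx_max _ htop
            have hsum : mn + (values.length : Int) = mx + 1 := by omega
            rw [hmem' x, hsum]
            exact ⟨h1, h2⟩
          · intro hx
            exact ⟨hmn_min x hx, by have := hmx_max x hx; omega⟩
        · rw [hb]
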